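-- pv_equiv track=rewrite | github.com/PatrickL546/Hydrax-Abyss.to-DownloadHelper-Python | Hydrax-Abyss.to-DownloadHelper.py | generate_range_split
-- ===== SOURCE A (Python) =====
-- def generate_range_split(file_size, split):
--     result_size = 0
--     chunk_range = []
--     chunk_size = file_size // split
--     for i in range(split):
--         min_val = i * chunk_size
--         max_val = min_val + chunk_size - 1
--         if i == split - 1:
--             max_val = file_size - 1
--
--         result_size += max_val - min_val + 1
--         chunk_range.append(f"{min_val}-{max_val}")
--
--     return chunk_range, chunk_size
-- ===== SOURCE B (Python) =====
-- def generate_range_split(file_size, split):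
--     chunk_size = file_size // split
--     # Build the chunks back-to-front: walk from the last chunk towards the first,
--     # tracking the current chunk's end; the last chunk's end is file_size - 1,
--     # every earlier chunk ends just before the next one starts. No special-case
--     # branch for the last index is needed. Reverse once at the end.
--     chunk_range = []
--     end = file_size - 1
--     k = split
--     while k > 0:
--         start = (k - 1) * chunk_size
--         chunk_range.append(f"{start}-{end}")
--         end = start - 1
--         k -= 1
--     chunk_range.reverse()
--     return chunk_range, chunk_size
-- ===== Notes on version B (the rewrite author's own statement) =====
-- stated objective: alternative
-- what changed: Builds the chunk list back-to-front with a while loop that counts down from split and threads the current chunk's end position through the loop (so the i==split-1 special case disappears), then reverses the list once; A iterates forward over range(split) with an explicit last-index branch.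
import Mathlib
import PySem

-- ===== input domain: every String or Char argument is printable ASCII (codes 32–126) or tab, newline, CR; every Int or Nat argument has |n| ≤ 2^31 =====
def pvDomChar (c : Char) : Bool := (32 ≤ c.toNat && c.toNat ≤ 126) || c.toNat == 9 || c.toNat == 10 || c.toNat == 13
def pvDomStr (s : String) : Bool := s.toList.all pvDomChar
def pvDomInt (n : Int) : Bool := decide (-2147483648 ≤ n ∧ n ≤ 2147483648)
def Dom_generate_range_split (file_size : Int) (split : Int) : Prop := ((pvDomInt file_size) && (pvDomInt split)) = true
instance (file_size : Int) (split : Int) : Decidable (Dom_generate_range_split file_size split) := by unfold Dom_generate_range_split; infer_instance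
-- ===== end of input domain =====

-- B builds the chunk list back-to-front, counting down while threading the current
-- chunk's end position (no last-index branch), then reverses once; objective: alternative.

-- ===== PORT A =====
def generate_range_split (file_size : Int) (split : Int) : List String × Int :=
  let chunk_size := PySem.Int.floordiv file_size split
  let st := (PySem.List.pyRange 0 split 1).foldl
    (fun (acc : Int × List String) i =>
      let min_val := i * chunk_size
      let max_val := min_val + chunk_size - 1
      let max_val := if i = split - 1 then file_size - 1 else max_val
      (acc.1 + (max_val - min_val + 1),
       acc.2 ++ [PySem.Int.toStr min_val ++ "-" ++ PySem.Int.toStr max_val]))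
    (0, [])
  (st.2, chunk_size)

-- ===== PORT B =====
-- while k > 0: emit f"{(k-1)*chunk_size}-{end}", end := start - 1, k := k - 1
-- (structural recursion on the countdown counter, as in Source B's while loop)
def generate_range_split_build (cs : Int) : Nat → Int → List String → List String
  | 0, _, acc => acc
  | Nat.succ n, e, acc =>
      generate_range_split_build cs n ((n : Int) * cs - 1)
        (acc ++ [PySem.Int.toStr ((n : Int) * cs) ++ "-" ++ PySem.Int.toStr e])

def generate_range_split_alt (file_size : Int) (split : Int) : List String × Int :=
  let chunk_size := PySem.Int.floordiv file_size split
  let chunk_range := generate_range_split_build chunk_size split.toNat (file_size - 1) []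
  (chunk_range.reverse, chunk_size)

-- ===== PRECONDITION & SPEC =====
-- split = 0 is excluded: both programs raise ZeroDivisionError there.
def Pre_generate_range_split (file_size : Int) (split : Int) : Prop := split ≠ 0
instance (file_size : Int) (split : Int) : Decidable (Pre_generate_range_split file_size split) := by unfold Pre_generate_range_split; infer_instance
def pvWitness_generate_range_split : Int × Int := (10, 3)

def Spec_generate_range_split (file_size : Int) (split : Int) (out : List String × Int) : Prop := out = generate_range_split_alt file_size split
instance (file_size : Int) (split : Int) (out : List String × Int) : Decidable (Spec_generate_range_split file_size split out) := by unfold Spec_generate_range_split; infer_instance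

-- ===== CLAIM =====
def Claim_equal_generate_range_split : Prop := ∀ (file_size : Int) (split : Int), Dom_generate_range_split file_size split → Pre_generate_range_split file_size split → Spec_generate_range_split file_size split (generate_range_split file_size split)

-- ===== LEMMAS AND PROOFS =====

-- characterization of B's countdown loop: it emits the chunk strings in reverse order
lemma build_eq (cs : Int) : ∀ (n : Nat) (e : Int) (acc : List String),
    generate_range_split_build cs n e acc =
      acc ++ (((List.range n).map Int.ofNat).map (fun j =>
        PySem.Int.toStr (j * cs) ++ "-" ++
        PySem.Int.toStr (if j = (n : Int) - 1 then e else j * cs + cs - 1))).reverse := by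
  intro n
  induction n with
  | zero => intro e acc; simp [generate_range_split_build]
  | succ n ih =>
    intro e acc
    rw [generate_range_split_build, ih]
    rw [List.range_succ, List.map_append, List.map_append, List.reverse_append]
    simp only [List.map_cons, List.map_nil, List.reverse_cons, List.reverse_nil,
      List.nil_append, List.append_assoc, Int.ofNat_eq_natCast]
    rw [if_pos (show ((n : Int)) = ((n + 1 : Nat) : Int) - 1 by push_cast; omega)]
    have hmap : List.map (fun j =>
          PySem.Int.toStr (j * cs) ++ "-" ++
            PySem.Int.toStr (if j = (n : Int) - 1 then (n : Int) * cs - 1 else j * cs + cs - 1))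
          (List.map Int.ofNat (List.range n)) =
        List.map (fun j =>
          PySem.Int.toStr (j * cs) ++ "-" ++
            PySem.Int.toStr (if j = ((n + 1 : Nat) : Int) - 1 then e else j * cs + cs - 1))
          (List.map Int.ofNat (List.range n)) := by
      refine List.map_congr_left ?_
      intro j hj
      simp only [List.mem_map, List.mem_range] at hj
      obtain ⟨k, hk, rfl⟩ := hj
      simp only [Int.ofNat_eq_natCast]
      by_cases h : (k : Int) = (n : Int) - 1
      · rw [if_pos h, if_neg (by push_cast; omega), h]; congr 1; ring_nf
      · rw [if_neg h, if_neg (by push_cast; omega)]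
    rw [hmap]

-- ===== VERDICT =====
theorem generate_range_split_spec : Claim_equal_generate_range_split := by
  intro fs s _ _
  unfold Spec_generate_range_split generate_range_split generate_range_split_alt
  simp only []
  refine Prod.ext ?_ rfl
  rw [PySem.List.foldl_prod_mk
        (f := fun (a : Int) (i : Int) =>
          a + ((if i = s - 1 then fs - 1 else i * PySem.Int.floordiv fs s + PySem.Int.floordiv fs s - 1)
                - i * PySem.Int.floordiv fs s + 1))
        (g := fun (a : List String) (i : Int) =>
          a ++ [PySem.Int.toStr (i * PySem.Int.floordiv fs s) ++ "-" ++
                PySem.Int.toStr (if i = s - 1 then fs - 1 else i * PySem.Int.floordiv fs s + PySem.Int.floordiv fs s - 1)])]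
  rw [PySem.List.foldl_append_singleton_eq_map, List.nil_append]
  rw [build_eq, List.nil_append, List.reverse_reverse]
  by_cases hs : 0 < s
  · rw [PySem.List.pyRange_one]
    dsimp only
    have hcast : ((s.toNat : Int)) = s := Int.toNat_of_nonneg (le_of_lt hs)
    simp only [Int.sub_zero, zero_add, List.map_map, Function.comp_def, hcast, Int.ofNat_eq_natCast]
  · rw [PySem.List.pyRange_one_eq_nil (by omega)]
    have h0 : s.toNat = 0 := by omega
    rw [h0]
    simp
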